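-- pv_equiv track=rewrite | github.com/jim0607/Leetcode | Solutions/0562.Longest-Line-of-Consecutive-One-in-Matrix.py | longest_antidiagonal_line
-- ===== SOURCE A (Python) =====
-- def longest_antidiagonal_line(matrix):
--     m, n = len(matrix), len(matrix[0])
--     dp = [[0] * n for _ in range(m)]
--     for i in range(m):
--         if matrix[i][n-1] == 1:
--             dp[i][n-1] = 1
--     for j in range(n):
--         if matrix[0][j] == 1:
--             dp[0][j] = 1
--     for i in range(1, m):
--         for j in range(n - 2, -1, -1):
--             if matrix[i][j] == 1:
--                 dp[i][j] = dp[i-1][j+1] + 1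
--
--     max_lens = 0
--     for i in range(m):
--         for j in range(n):
--             max_lens = max(max_lens, dp[i][j])
--     return max_lens
-- ===== SOURCE B (Python) =====
-- def longest_antidiagonal_line(matrix):
--     m, n = len(matrix), len(matrix[0])
--     starts = [(0, j) for j in range(n)] + [(i, n - 1) for i in range(1, m)]
--     best = 0
--     for (i, j) in starts:
--         run = 0
--         while i < m and j >= 0:
--             if matrix[i][j] == 1:
--                 run += 1
--                 if run > best:
--                     best = run
--             else:
--                 run = 0
--             i += 1
--             j -= 1
--     return best
-- ===== Notes on version B (the rewrite author's own statement) =====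
-- stated objective: simpler
-- what changed: Replaces the O(m*n) dp table (three fill loops plus a separate max pass) with a direct walk down each anti-diagonal keeping only an O(1) running counter of consecutive ones and one global maximum.
import Mathlib
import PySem

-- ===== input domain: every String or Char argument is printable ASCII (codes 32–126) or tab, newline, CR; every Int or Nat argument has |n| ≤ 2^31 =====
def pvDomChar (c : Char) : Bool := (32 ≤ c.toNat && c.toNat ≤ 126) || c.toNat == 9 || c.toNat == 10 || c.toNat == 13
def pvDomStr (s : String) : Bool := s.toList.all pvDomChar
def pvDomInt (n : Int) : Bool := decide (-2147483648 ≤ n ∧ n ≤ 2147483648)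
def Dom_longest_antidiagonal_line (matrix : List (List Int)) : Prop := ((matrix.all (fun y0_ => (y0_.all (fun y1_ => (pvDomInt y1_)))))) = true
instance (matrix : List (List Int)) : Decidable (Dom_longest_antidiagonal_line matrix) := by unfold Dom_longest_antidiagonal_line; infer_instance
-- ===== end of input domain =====

-- B drops A's O(m*n) dp table and separate max pass: it walks each anti-diagonal once with an
-- O(1) running counter, updating a single global maximum (objective: simpler).

-- ===== PORT A =====
-- matrix[i][j] (all reads are in range under Pre_; out of range Python raises, getD default is never read there)
def mget (M : List (List Int)) (i j : Nat) : Int := (M.getD i []).getD j 0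

-- dp[i][j] = v (the dp table kept as a mapping, updated in place like the Python list of lists)
def upd (dp : Nat → Nat → Int) (i j : Nat) (v : Int) : Nat → Nat → Int :=
  fun i' j' => if i' = i ∧ j' = j then v else dp i' j'

-- body of 'for i in range(m): if matrix[i][n-1] == 1: dp[i][n-1] = 1'
def dpCol (M : List (List Int)) (n : Nat) (dp : Nat → Nat → Int) (i : Nat) : Nat → Nat → Int :=
  if mget M i (n-1) = 1 then upd dp i (n-1) 1 else dp

-- body of 'for j in range(n): if matrix[0][j] == 1: dp[0][j] = 1'
def dpRow0 (M : List (List Int)) (dp : Nat → Nat → Int) (j : Nat) : Nat → Nat → Int :=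
  if mget M 0 j = 1 then upd dp 0 j 1 else dp

-- body of the inner loop 'for j in range(n-2, -1, -1)': k-th iteration touches j = n-2-k
def dpCell (M : List (List Int)) (n i : Nat) (dp : Nat → Nat → Int) (k : Nat) : Nat → Nat → Int :=
  if mget M i (n-2-k) = 1 then upd dp i (n-2-k) (dp (i-1) (n-2-k+1) + 1) else dp

-- body of 'for i in range(1, m)': i'-th iteration fills row i'+1 right to left
def dpOuter (M : List (List Int)) (n : Nat) (dp : Nat → Nat → Int) (i' : Nat) : Nat → Nat → Int :=
  (List.range (n-1)).foldl (dpCell M n (i'+1)) dp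

-- the final 'max_lens' double loop of A
def gridMax (g : Nat → Nat → Int) (m n : Nat) : Int :=
  (List.range m).foldl (fun acc i => (List.range n).foldl (fun acc j => max acc (g i j)) acc) 0

def longest_antidiagonal_line (matrix : List (List Int)) : Int :=
  let m := matrix.length
  let n := (matrix.getD 0 []).length
  let dp1 := (List.range m).foldl (dpCol matrix n) (fun _ _ => 0)
  let dp2 := (List.range n).foldl (dpRow0 matrix) dp1
  let dp3 := (List.range (m-1)).foldl (dpOuter matrix n) dp2
  gridMax dp3 m n

-- ===== PORT B =====
-- the 'while i < m and j >= 0' walk down one anti-diagonal, carrying (run, best)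
def walkB (matrix : List (List Int)) (m : Nat) (i : Nat) (j : Int) (run best : Int) : Int :=
  if h : i < m ∧ 0 ≤ j then
    if mget matrix i j.toNat = 1 then
      walkB matrix m (i+1) (j-1) (run+1) (max best (run+1))
    else
      walkB matrix m (i+1) (j-1) 0 best
  else best
termination_by m - i
decreasing_by all_goals omega

def longest_antidiagonal_line_alt (matrix : List (List Int)) : Int :=
  let m := matrix.length
  let n := (matrix.getD 0 []).length
  let starts := (List.range n).map (fun (j : Nat) => ((0:Nat), (j:Int))) ++
                (List.range (m-1)).map (fun i' => (i'+1, (n:Int)-1))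
  starts.foldl (fun best s => walkB matrix m s.1 s.2 0 best) 0

-- ===== PRECONDITION & SPEC =====
-- Pre_ = exactly the inputs where Python A returns: a nonempty matrix, a nonempty first row,
-- and every row at least as long as the first (otherwise matrix[0] or matrix[i][n-1] raises IndexError).
def Pre_longest_antidiagonal_line (matrix : List (List Int)) : Prop :=
  matrix ≠ [] ∧ 0 < (matrix.getD 0 []).length ∧
    ∀ row ∈ matrix, (matrix.getD 0 []).length ≤ row.length
instance (matrix : List (List Int)) : Decidable (Pre_longest_antidiagonal_line matrix) := by
  unfold Pre_longest_antidiagonal_line; infer_instance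

def pvWitness_longest_antidiagonal_line : List (List Int) := [[0, 1], [1, 0]]

def Spec_longest_antidiagonal_line (matrix : List (List Int)) (out : Int) : Prop := out = longest_antidiagonal_line_alt matrix
instance (matrix : List (List Int)) (out : Int) : Decidable (Spec_longest_antidiagonal_line matrix out) := by unfold Spec_longest_antidiagonal_line; infer_instance

-- ===== CLAIM (what is proved, stated in full; the proofs are below) =====
def Claim_equal_longest_antidiagonal_line : Prop := ∀ (matrix : List (List Int)), Dom_longest_antidiagonal_line matrix → Pre_longest_antidiagonal_line matrix → Spec_longest_antidiagonal_line matrix (longest_antidiagonal_line matrix)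

-- ===== LEMMAS AND PROOFS =====

-- length of the run of consecutive 1s ending at (i,j) along its anti-diagonal
def runlen (M : List (List Int)) (n : Nat) : Nat → Nat → Int
  | 0, j => if mget M 0 j = 1 then 1 else 0
  | (i+1), j => if mget M (i+1) j = 1 then (if j+1 = n then 1 else runlen M n i (j+1) + 1) else 0

-- max of runlen over the anti-diagonal starting at (i,j)
def diagMax (M : List (List Int)) (n m : Nat) (i : Nat) (j : Int) : Int :=
  if h : i < m ∧ 0 ≤ j then max (diagMax M n m (i+1) (j-1)) (runlen M n i j.toNat) else 0
termination_by m - i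
decreasing_by all_goals omega

lemma runlen_nonneg (M : List (List Int)) (n : Nat) : ∀ i j, 0 ≤ runlen M n i j := by
  intro i
  induction i with
  | zero => intro j; simp only [runlen]; split <;> omega
  | succ i ih =>
    intro j
    simp only [runlen]
    split
    · split
      · omega
      · have := ih (j+1); omega
    · omega

-- generic foldl helpers ---------------------------------------------------
lemma foldl_max_init {α : Type} (f : α → Int) : ∀ (l : List α) (b : Int),
    b ≤ l.foldl (fun a x => max a (f x)) b := by
  intro l
  induction l with
  | nil => simp
  | cons y l ih =>
    intro b
    simp only [List.foldl_cons]
    exact le_trans (le_max_left b (f y)) (ih (max b (f y)))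

lemma foldl_max_mem {α : Type} (f : α → Int) : ∀ (l : List α) (b : Int) (x : α), x ∈ l →
    f x ≤ l.foldl (fun a x => max a (f x)) b := by
  intro l
  induction l with
  | nil => intro b x h; simp at h
  | cons y l ih =>
    intro b x hx
    simp only [List.foldl_cons]
    rcases List.mem_cons.mp hx with h | h
    · subst h
      exact le_trans (le_max_right b (f x)) (foldl_max_init f l (max b (f x)))
    · exact ih (max b (f y)) x h

lemma foldl_max_le {α : Type} (f : α → Int) : ∀ (l : List α) (b c : Int), b ≤ c →
    (∀ x ∈ l, f x ≤ c) → l.foldl (fun a x => max a (f x)) b ≤ c := by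
  intro l
  induction l with
  | nil => intro b c hbc _; simpa using hbc
  | cons y l ih =>
    intro b c hbc hall
    simp only [List.foldl_cons]
    exact ih (max b (f y)) c (max_le hbc (hall y (List.mem_cons_self)))
      (fun x hx => hall x (List.mem_cons_of_mem _ hx))

lemma foldl_init_le {α : Type} (step : Int → α → Int) (h : ∀ a x, a ≤ step a x) :
    ∀ (l : List α) (b : Int), b ≤ l.foldl step b := by
  intro l
  induction l with
  | nil => intro b; simp
  | cons y l ih =>
    intro b
    simp only [List.foldl_cons]
    exact le_trans (h b y) (ih (step b y))

lemma foldl_ge_mem {α : Type} (step : Int → α → Int) (hmono : ∀ a x, a ≤ step a x)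
    (c : Int) (x : α) (hx : ∀ a, c ≤ step a x) :
    ∀ (l : List α) (b : Int), x ∈ l → c ≤ l.foldl step b := by
  intro l
  induction l with
  | nil => intro b h; simp at h
  | cons y l ih =>
    intro b hxl
    simp only [List.foldl_cons]
    rcases List.mem_cons.mp hxl with h | h
    · subst h
      exact le_trans (hx b) (foldl_init_le step hmono l (step b x))
    · exact ih (step b y) h

lemma foldl_le {α : Type} (step : Int → α → Int) (c : Int) :
    ∀ (l : List α) (b : Int), b ≤ c → (∀ a x, a ≤ c → x ∈ l → step a x ≤ c) →
    l.foldl step b ≤ c := by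
  intro l
  induction l with
  | nil => intro b hb _; simpa using hb
  | cons y l ih =>
    intro b hb hstep
    simp only [List.foldl_cons]
    exact ih (step b y) (hstep b y hb (List.mem_cons_self))
      (fun a x ha hx => hstep a x ha (List.mem_cons_of_mem _ hx))

lemma foldl_congr' {α β : Type} (f g : β → α → β) :
    ∀ (l : List α) (b : β), (∀ a x, x ∈ l → f a x = g a x) → l.foldl f b = l.foldl g b := by
  intro l
  induction l with
  | nil => intro b _; rfl
  | cons y l ih =>
    intro b h
    simp only [List.foldl_cons]
    rw [h b y (List.mem_cons_self)]
    exact ih (g b y) (fun a x hx => h a x (List.mem_cons_of_mem _ hx))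

-- gridMax facts -----------------------------------------------------------
lemma gridMax_nonneg (g : Nat → Nat → Int) (m n : Nat) : 0 ≤ gridMax g m n := by
  unfold gridMax
  exact foldl_init_le _ (fun a i => foldl_max_init (g i) (List.range n) a) (List.range m) 0

lemma gridMax_ge (g : Nat → Nat → Int) (m n : Nat) {i j : Nat} (hi : i < m) (hj : j < n) :
    g i j ≤ gridMax g m n := by
  unfold gridMax
  exact foldl_ge_mem _ (fun a i' => foldl_max_init (g i') (List.range n) a) (g i j) i
    (fun a => foldl_max_mem (g i) (List.range n) a j (List.mem_range.mpr hj))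
    (List.range m) 0 (List.mem_range.mpr hi)

lemma gridMax_le (g : Nat → Nat → Int) (m n : Nat) {c : Int} (hc : 0 ≤ c)
    (h : ∀ i < m, ∀ j < n, g i j ≤ c) : gridMax g m n ≤ c := by
  unfold gridMax
  exact foldl_le _ c (List.range m) 0 hc
    (fun a i' ha hi' => foldl_max_le (g i') (List.range n) a c ha
      (fun j' hj' => h i' (List.mem_range.mp hi') j' (List.mem_range.mp hj')))

lemma gridMax_congr (g g' : Nat → Nat → Int) (m n : Nat)
    (h : ∀ i < m, ∀ j < n, g i j = g' i j) : gridMax g m n = gridMax g' m n := by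
  unfold gridMax
  apply foldl_congr'
  intro a i hi
  apply foldl_congr'
  intro a' j hj
  rw [h i (List.mem_range.mp hi) j (List.mem_range.mp hj)]

-- A side: the dp table computes runlen ------------------------------------
lemma dpCol_fold (M : List (List Int)) (n : Nat) :
    ∀ (l : List Nat) (dp : Nat → Nat → Int) (i j : Nat),
      (l.foldl (dpCol M n) dp) i j
        = if i ∈ l ∧ j = n-1 ∧ mget M i (n-1) = 1 then 1 else dp i j := by
  intro l
  induction l with
  | nil => intro dp i j; simp
  | cons a l ih =>
    intro dp i j
    simp only [List.foldl_cons, ih, dpCol, List.mem_cons]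
    by_cases hc : mget M a (n-1) = 1 <;> by_cases hia : i = a <;> by_cases hj : j = n-1 <;>
      simp_all [upd]

lemma dpRow0_fold (M : List (List Int)) :
    ∀ (l : List Nat) (dp : Nat → Nat → Int) (i j : Nat),
      (l.foldl (dpRow0 M) dp) i j
        = if i = 0 ∧ j ∈ l ∧ mget M 0 j = 1 then 1 else dp i j := by
  intro l
  induction l with
  | nil => intro dp i j; simp
  | cons a l ih =>
    intro dp i j
    simp only [List.foldl_cons, ih, dpRow0, List.mem_cons]
    by_cases hc : mget M 0 a = 1 <;> by_cases hia : i = 0 <;> by_cases hj : j = a <;>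
      simp_all [upd]

-- the dp table after the two seeding loops
def dp2val (M : List (List Int)) (n m : Nat) (i j : Nat) : Int :=
  if i = 0 ∧ j < n ∧ mget M 0 j = 1 then 1
  else if i < m ∧ j = n-1 ∧ mget M i (n-1) = 1 then 1 else 0

lemma dp2_spec (M : List (List Int)) (n m : Nat) (i j : Nat) :
    ((List.range n).foldl (dpRow0 M) ((List.range m).foldl (dpCol M n) (fun _ _ => 0))) i j
      = dp2val M n m i j := by
  rw [dpRow0_fold, dpCol_fold]
  simp only [dp2val, List.mem_range]

lemma dp2val_row0 (M : List (List Int)) (n m : Nat) {j : Nat} (hj : j < n) :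
    dp2val M n m 0 j = runlen M n 0 j := by
  simp only [dp2val, runlen]
  split_ifs <;> simp_all

lemma dp2val_lastcol (M : List (List Int)) (n m : Nat) {i : Nat} (hi : i < m) (hn : 0 < n) :
    dp2val M n m i (n-1) = runlen M n i (n-1) := by
  cases i <;> (simp only [dp2val, runlen]; split_ifs <;> simp_all <;> omega)

lemma dp2val_zero (M : List (List Int)) (n m : Nat) {i j : Nat} (hi : 1 ≤ i) (hj : j < n-1) :
    dp2val M n m i j = 0 := by
  simp only [dp2val]
  split_ifs with h1 h2
  · omega
  · omega
  · rfl

-- inner loop: fills row r right to left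
lemma dpCell_fold (M : List (List Int)) (n : Nat) (r : Nat) (hr : 1 ≤ r) :
    ∀ (s : Nat) (dp : Nat → Nat → Int), s ≤ n-1 →
      (∀ j, j < n → dp (r-1) j = runlen M n (r-1) j) →
      (∀ j, j < n-1 → dp r j = 0) →
      ∀ i j, ((List.range s).foldl (dpCell M n r) dp) i j
        = if i = r ∧ n-1-s ≤ j ∧ j+1 < n then runlen M n r j else dp i j := by
  obtain ⟨r', rfl⟩ : ∃ r', r = r' + 1 := ⟨r - 1, by omega⟩
  intro s
  induction s with
  | zero =>
    intro dp _ hprev hz i j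
    simp only [List.range_zero, List.foldl_nil]
    split_ifs with h
    · omega
    · rfl
  | succ s ihs =>
    intro dp hs hprev hz i j
    have hsz : s ≤ n - 1 := by omega
    have hn2 : n - 2 - s + 1 < n := by omega
    rw [List.range_succ, List.foldl_append, List.foldl_cons, List.foldl_nil]
    have hEij : ∀ i j, ((List.range s).foldl (dpCell M n (r'+1)) dp) i j
        = if i = r'+1 ∧ n-1-s ≤ j ∧ j+1 < n then runlen M n (r'+1) j else dp i j :=
      fun i j => ihs dp hsz hprev hz i j
    have hread : ((List.range s).foldl (dpCell M n (r'+1)) dp) r' (n-2-s+1)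
        = runlen M n r' (n-2-s+1) := by
      rw [hEij]
      rw [if_neg (by omega)]
      simpa using hprev (n-2-s+1) hn2
    by_cases hc : mget M (r'+1) (n-2-s) = 1
    · simp only [dpCell, hc, if_true, upd]
      by_cases hij : i = r'+1 ∧ j = n-2-s
      · rw [if_pos hij]
        obtain ⟨rfl, rfl⟩ := hij
        rw [if_pos (by omega)]
        simp only [Nat.add_sub_cancel]
        rw [hread]
        simp only [runlen, hc, if_true]
        rw [if_neg (by omega)]
      · rw [if_neg hij]
        rw [hEij]
        by_cases h1 : i = r'+1 ∧ n-1-s ≤ j ∧ j+1 < n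
        · rw [if_pos h1, if_pos (by omega)]
        · rw [if_neg h1, if_neg (by omega)]
    · simp only [dpCell, hc, if_false]
      rw [hEij]
      by_cases hij : i = r'+1 ∧ j = n-2-s
      · obtain ⟨rfl, rfl⟩ := hij
        rw [if_neg (by omega), if_pos (by omega)]
        have hz' := hz (n-2-s) (by omega)
        rw [hz']
        cases r' <;> simp [runlen, hc]
      · by_cases h1 : i = r'+1 ∧ n-1-s ≤ j ∧ j+1 < n
        · rw [if_pos h1, if_pos (by omega)]
        · rw [if_neg h1, if_neg (by omega)]

-- outer loop: after t iterations rows 0..t hold runlen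
lemma dpOuter_fold (M : List (List Int)) (n m : Nat) :
    ∀ (t : Nat), t ≤ m-1 →
      ∀ i j, i < m → j < n →
        ((List.range t).foldl (dpOuter M n)
          ((List.range n).foldl (dpRow0 M) ((List.range m).foldl (dpCol M n) (fun _ _ => 0)))) i j
          = if i ≤ t then runlen M n i j else dp2val M n m i j := by
  intro t
  induction t with
  | zero =>
    intro _ i j hi hj
    simp only [List.range_zero, List.foldl_nil]
    rw [dp2_spec]
    split_ifs with h
    · have : i = 0 := by omega
      subst this
      exact dp2val_row0 M n m hj
    · rfl
  | succ t iht =>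
    intro ht i j hi hj
    have ht' : t ≤ m - 1 := by omega
    rw [List.range_succ, List.foldl_append, List.foldl_cons, List.foldl_nil]
    have iht' := iht ht'
    generalize hD : List.foldl (dpOuter M n)
      (List.foldl (dpRow0 M) (List.foldl (dpCol M n) (fun _ _ => (0:Int)) (List.range m))
        (List.range n)) (List.range t) = D at iht' ⊢
    rw [dpOuter]
    rw [dpCell_fold M n (t+1) (by omega) (n-1) D le_rfl
      (fun j' hj' => by
        simp only [Nat.add_sub_cancel]
        rw [iht' t j' (by omega) hj', if_pos (le_refl t)])
      (fun j' hj' => by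
        rw [iht' (t+1) j' (by omega) (by omega), if_neg (by omega)]
        exact dp2val_zero M n m (by omega) hj') i j]
    by_cases hij : i = t+1 ∧ n-1-(n-1) ≤ j ∧ j+1 < n
    · rw [if_pos hij, if_pos (by omega)]
      rw [hij.1]
    · rw [if_neg hij, iht' i j hi hj]
      by_cases hle : i ≤ t
      · rw [if_pos hle, if_pos (by omega)]
      · rw [if_neg hle]
        by_cases hle1 : i ≤ t+1
        · have hi1 : i = t+1 := by omega
          have hj1 : j = n-1 := by omega
          rw [if_pos hle1]
          subst hi1; subst hj1
          exact dp2val_lastcol M n m hi (by omega)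
        · rw [if_neg hle1]

lemma A_eq_gridMax (M : List (List Int)) :
    longest_antidiagonal_line M = gridMax (runlen M (M.getD 0 []).length) M.length (M.getD 0 []).length := by
  simp only [longest_antidiagonal_line]
  apply gridMax_congr
  intro i hi j hj
  rw [dpOuter_fold M ((M.getD 0 []).length) M.length (M.length - 1) le_rfl i j hi hj]
  rw [if_pos (by omega)]

-- B side: the walk computes diagMax ---------------------------------------
lemma diagMax_nonneg (M : List (List Int)) (n m : Nat) (i : Nat) (j : Int) :
    0 ≤ diagMax M n m i j := by
  rw [diagMax]
  split
  · exact le_trans (runlen_nonneg M n _ _) (le_max_right _ _)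
  · exact le_refl 0

lemma walk_eq (M : List (List Int)) (n m : Nat) :
    ∀ (fuel i : Nat) (j run best : Int), m - i ≤ fuel → j < (n:Int) → 0 ≤ best →
      run = (if i = 0 ∨ (n:Int) ≤ j+1 then 0 else runlen M n (i-1) (j+1).toNat) →
      walkB M m i j run best = max best (diagMax M n m i j) := by
  intro fuel
  induction fuel with
  | zero =>
    intro i j run best hfuel hj hbest hok
    rw [walkB, diagMax, dif_neg (by omega), dif_neg (by omega)]
    exact (max_eq_left hbest).symm
  | succ fuel ih =>
    intro i j run best hfuel hj hbest hok
    by_cases hcond : i < m ∧ 0 ≤ j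
    · rw [walkB, diagMax, dif_pos hcond, dif_pos hcond]
      by_cases hc : mget M i j.toNat = 1
      · rw [if_pos hc]
        have hrun1 : run + 1 = runlen M n i j.toNat := by
          rcases i with _ | i'
          · rw [if_pos (Or.inl rfl)] at hok
            simp only [runlen, hc, if_true]
            omega
          · by_cases hnj : (n:Int) ≤ j + 1
            · rw [if_pos (Or.inr hnj)] at hok
              have hjn : j.toNat + 1 = n := by omega
              simp only [runlen, hc, if_true, if_pos hjn]
              omega
            · rw [if_neg (by push Not; exact ⟨by omega, by omega⟩)] at hok
              have htn : (j+1).toNat = j.toNat + 1 := by omega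
              simp only [Nat.add_sub_cancel, htn] at hok
              simp only [runlen, hc, if_true]
              rw [if_neg (by omega)]
              omega
        have hok' : run + 1 = (if i + 1 = 0 ∨ (n:Int) ≤ (j-1)+1 then 0
            else runlen M n (i+1-1) ((j-1)+1).toNat) := by
          rw [if_neg (by push Not; exact ⟨by omega, by omega⟩)]
          simpa using hrun1
        rw [ih (i+1) (j-1) (run+1) (max best (run+1)) (by omega) (by omega)
          (le_trans hbest (le_max_left _ _)) hok']
        rw [← hrun1, max_assoc, max_comm (run+1) (diagMax M n m (i+1) (j-1))]
      · rw [if_neg hc]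
        have hr0 : runlen M n i j.toNat = 0 := by
          rcases i with _ | i' <;> simp [runlen, hc]
        have hok' : (0:Int) = (if i + 1 = 0 ∨ (n:Int) ≤ (j-1)+1 then 0
            else runlen M n (i+1-1) ((j-1)+1).toNat) := by
          rw [if_neg (by push Not; exact ⟨by omega, by omega⟩)]
          simpa using hr0.symm
        rw [ih (i+1) (j-1) 0 best (by omega) (by omega) hbest hok']
        rw [hr0, max_eq_left (diagMax_nonneg M n m (i+1) (j-1))]
    · rw [walkB, diagMax, dif_neg hcond, dif_neg hcond]
      exact (max_eq_left hbest).symm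

lemma B_fold (M : List (List Int)) (n m : Nat) :
    ∀ (l : List (Nat × Int)) (b : Int), 0 ≤ b →
      (∀ s ∈ l, s.2 < (n:Int) ∧ (s.1 = 0 ∨ s.2 = (n:Int)-1)) →
      l.foldl (fun best s => walkB M m s.1 s.2 0 best) b
        = l.foldl (fun best s => max best (diagMax M n m s.1 s.2)) b := by
  intro l
  induction l with
  | nil => intro b _ _; rfl
  | cons s l ih =>
    intro b hb hall
    simp only [List.foldl_cons]
    have hs := hall s List.mem_cons_self
    have hw : walkB M m s.1 s.2 0 b = max b (diagMax M n m s.1 s.2) := by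
      apply walk_eq M n m (m - s.1) s.1 s.2 0 b le_rfl hs.1 hb
      rcases hs.2 with h0 | hlast
      · rw [if_pos (Or.inl h0)]
      · rw [if_pos (Or.inr (by omega))]
    rw [hw]
    exact ih (max b (diagMax M n m s.1 s.2)) (le_trans hb (le_max_left _ _))
      (fun x hx => hall x (List.mem_cons_of_mem _ hx))

-- diagonals cover the grid -------------------------------------------------
lemma diag_ge_cell (M : List (List Int)) (n m : Nat) :
    ∀ (k i : Nat) (j : Int), i + k < m → 0 ≤ j - k →
      runlen M n (i+k) (j - k).toNat ≤ diagMax M n m i j := by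
  intro k
  induction k with
  | zero =>
    intro i j hi hj
    rw [diagMax, dif_pos ⟨by omega, by omega⟩]
    have e : j - ((0:Nat):Int) = j := by push_cast; ring
    simp only [Nat.add_zero, e]
    exact le_max_right _ _
  | succ k ihk =>
    intro i j hi hj
    have e1 : i + (k+1) = (i+1) + k := by omega
    have e2 : j - ((k+1:Nat):Int) = (j-1) - (k:Int) := by push_cast; ring
    rw [e1, e2]
    refine le_trans (ihk (i+1) (j-1) (by omega) (by
      have h2 : (0:Int) ≤ j - ((k+1:Nat):Int) := hj
      push_cast at h2 ⊢
      omega)) ?_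
    have hu : diagMax M n m i j
        = max (diagMax M n m (i+1) (j-1)) (runlen M n i j.toNat) := by
      rw [diagMax, dif_pos ⟨by omega, by
        have h2 : (0:Int) ≤ j - ((k+1:Nat):Int) := hj
        push_cast at h2
        omega⟩]
    rw [hu]
    exact le_max_left _ _

lemma diag_le_grid (M : List (List Int)) (n m : Nat) :
    ∀ (fuel i : Nat) (j : Int), m - i ≤ fuel → j < (n:Int) →
      diagMax M n m i j ≤ gridMax (runlen M n) m n := by
  intro fuel
  induction fuel with
  | zero =>
    intro i j h0 hj
    rw [diagMax, dif_neg (by omega)]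
    exact gridMax_nonneg _ _ _
  | succ fuel ih =>
    intro i j hf hj
    rw [diagMax]
    by_cases hcond : i < m ∧ 0 ≤ j
    · rw [dif_pos hcond]
      apply max_le
      · exact ih (i+1) (j-1) (by omega) (by omega)
      · exact gridMax_ge (runlen M n) m n hcond.1 (by omega)
    · rw [dif_neg hcond]
      exact gridMax_nonneg _ _ _

lemma starts_prop (n m : Nat) :
    ∀ s ∈ (List.range n).map (fun (j : Nat) => ((0:Nat), (j:Int))) ++
      (List.range (m-1)).map (fun i' => (i'+1, (n:Int)-1)),
      s.2 < (n:Int) ∧ (s.1 = 0 ∨ s.2 = (n:Int)-1) := by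
  intro s hs
  simp only [List.mem_append, List.mem_map, List.mem_range] at hs
  rcases hs with ⟨j, hj, rfl⟩ | ⟨i', hi', rfl⟩
  · exact ⟨show ((j:Int)) < (n:Int) by exact_mod_cast hj, Or.inl rfl⟩
  · exact ⟨by omega, Or.inr rfl⟩

lemma grid_eq_starts (M : List (List Int)) (n m : Nat) :
    gridMax (runlen M n) m n
      = ((List.range n).map (fun (j : Nat) => ((0:Nat), (j:Int))) ++
         (List.range (m-1)).map (fun i' => (i'+1, (n:Int)-1))).foldl
          (fun (best : Int) (s : Nat × Int) => max best (diagMax M n m s.1 s.2)) 0 := by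
  set starts := (List.range n).map (fun (j : Nat) => ((0:Nat), (j:Int))) ++
      (List.range (m-1)).map (fun i' => (i'+1, (n:Int)-1)) with hst
  apply le_antisymm
  · apply gridMax_le (runlen M n) m n
    · exact foldl_max_init (fun (s : Nat × Int) => diagMax M n m s.1 s.2) starts 0
    · intro i hi j hj
      by_cases hcase : i + j ≤ n - 1
      · -- start of this diagonal is in the first row
        have hmem : ((0:Nat), ((j+i:Nat):Int)) ∈ starts := by
          rw [hst]
          simp only [List.mem_append, List.mem_map, List.mem_range]
          exact Or.inl ⟨j+i, by omega, rfl⟩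
        have h1 : runlen M n i j ≤ diagMax M n m 0 ((j+i:Nat):Int) := by
          have := diag_ge_cell M n m i 0 ((j+i:Nat):Int) (by omega) (by push_cast; omega)
          have e : (((j+i:Nat):Int) - (i:Nat)).toNat = j := by omega
          simpa [e] using this
        exact le_trans h1 (foldl_max_mem (fun (s : Nat × Int) => diagMax M n m s.1 s.2) starts 0 _ hmem)
      · -- start of this diagonal is in the last column
        have hmem : ((i - (n-1-j) - 1) + 1, (n:Int)-1) ∈ starts := by
          rw [hst]
          simp only [List.mem_append, List.mem_map, List.mem_range]
          exact Or.inr ⟨i - (n-1-j) - 1, by omega, rfl⟩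
        have h1 : runlen M n i j ≤ diagMax M n m (i - (n-1-j)) ((n:Int)-1) := by
          have := diag_ge_cell M n m (n-1-j) (i - (n-1-j)) ((n:Int)-1) (by omega) (by omega)
          have e1 : i - (n-1-j) + (n-1-j) = i := by omega
          have e2 : (((n:Int)-1) - ((n-1-j:Nat):Int)).toNat = j := by omega
          rw [e1, e2] at this
          exact this
        have e3 : i - (n-1-j) - 1 + 1 = i - (n-1-j) := by omega
        rw [← e3] at h1
        exact le_trans h1 (foldl_max_mem (fun (s : Nat × Int) => diagMax M n m s.1 s.2) starts 0 _ hmem)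
  · apply foldl_max_le (fun (s : Nat × Int) => diagMax M n m s.1 s.2) starts 0
    · exact gridMax_nonneg _ _ _
    · intro s hs
      exact diag_le_grid M n m m s.1 s.2 (by omega) ((starts_prop n m s hs).1)

lemma main_eq (M : List (List Int)) :
    longest_antidiagonal_line M = longest_antidiagonal_line_alt M := by
  rw [A_eq_gridMax M]
  simp only [longest_antidiagonal_line_alt]
  rw [B_fold M (M.getD 0 []).length M.length _ 0 le_rfl (starts_prop _ _)]
  exact grid_eq_starts M _ _

-- ===== VERDICT (by name: the statement is the Claim_ definition above) =====
theorem longest_antidiagonal_line_spec : Claim_equal_longest_antidiagonal_line := by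
  intro matrix _ _
  unfold Spec_longest_antidiagonal_line
  exact main_eq matrix
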